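-- pv_equiv track=rewrite | github.com/notoriousno/teamsite | routes/root.py | win_loss_tie
-- ===== SOURCE A (Python) =====
-- def win_loss_tie(match_results):
--     """
--     :param match_results: [(_id, team, our_score, their_score), ...]
--     :return: (win, loss, tie)
--     """
--     win = 0
--     loss = 0
--     tie = 0
--
--     for _id, team, our_score, their_score in match_results:
--         if our_score > their_score:
--             win += 1
--         elif our_score < their_score:
--             loss += 1
--         else:
--             tie += 1
--
--     return (win, loss, tie)
-- ===== SOURCE B (Python) =====
-- def win_loss_tie(match_results):
--     # Sign-arithmetic reduction: maintain only the match count n, the signed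
--     # score-comparison sum s = sum(sign(o - t)) and the decisive-match count
--     # nz = sum(sign(o-t)**2); then win = (nz+s)//2, loss = (nz-s)//2, tie = n-nz.
--     n = 0
--     s = 0
--     nz = 0
--     for _id, team, o, t in match_results:
--         n += 1
--         d = (o > t) - (o < t)
--         s += d
--         nz += d * d
--     win = (nz + s) // 2
--     loss = (nz - s) // 2
--     return (win, loss, n - nz)
-- ===== Notes on version B (the rewrite author's own statement) =====
-- stated objective: alternative
-- what changed: Replaces the three-counter branch-per-record loop by a branchless sign-arithmetic reduction: it accumulates only the count n, the signed comparison sum s = sum(sign(o-t)) and the decisive count nz = sum(sign(o-t)^2), and recovers win = (nz+s)//2, loss = (nz-s)//2, tie = n-nz algebraically.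
import Mathlib
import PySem

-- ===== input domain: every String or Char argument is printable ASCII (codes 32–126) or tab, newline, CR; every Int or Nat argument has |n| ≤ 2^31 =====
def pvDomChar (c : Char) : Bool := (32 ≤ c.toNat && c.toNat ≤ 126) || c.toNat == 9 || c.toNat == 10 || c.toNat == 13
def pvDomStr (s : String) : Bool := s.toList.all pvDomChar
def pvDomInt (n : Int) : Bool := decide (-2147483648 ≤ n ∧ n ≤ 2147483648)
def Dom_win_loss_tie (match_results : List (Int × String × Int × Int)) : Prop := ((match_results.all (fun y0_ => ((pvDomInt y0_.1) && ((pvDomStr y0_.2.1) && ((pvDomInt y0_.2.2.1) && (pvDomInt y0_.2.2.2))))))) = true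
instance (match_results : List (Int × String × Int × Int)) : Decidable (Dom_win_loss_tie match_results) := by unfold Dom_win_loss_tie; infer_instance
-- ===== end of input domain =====

-- B replaces A's three-counter branch-per-record loop by a branchless sign-arithmetic
-- reduction (count n, signed sum s, decisive count nz) with the three counts recovered
-- algebraically; alternative decomposition, same cost.

-- ===== PORT A =====
-- the for-loop over (win, loss, tie), step for step
def win_loss_tie_aux : List (Int × String × Int × Int) → Int × Int × Int → Int × Int × Int
  | [], acc => acc
  | (_id, _team, our_score, their_score) :: rest, (win, loss, tie) =>
    if our_score > their_score then win_loss_tie_aux rest (win + 1, loss, tie)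
    else if our_score < their_score then win_loss_tie_aux rest (win, loss + 1, tie)
    else win_loss_tie_aux rest (win, loss, tie + 1)

def win_loss_tie (match_results : List (Int × String × Int × Int)) : Int × Int × Int :=
  win_loss_tie_aux match_results (0, 0, 0)

-- ===== PORT B =====
-- the loop accumulating (n, s, nz); d = (o > t) - (o < t) is Python's bool arithmetic
def win_loss_tie_alt_aux : List (Int × String × Int × Int) → Int × Int × Int → Int × Int × Int
  | [], acc => acc
  | (_id, _team, o, t) :: rest, (n, s, nz) =>
    let d : Int := (if o > t then 1 else 0) - (if o < t then 1 else 0)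
    win_loss_tie_alt_aux rest (n + 1, s + d, nz + d * d)

def win_loss_tie_alt (match_results : List (Int × String × Int × Int)) : Int × Int × Int :=
  let r := win_loss_tie_alt_aux match_results (0, 0, 0)
  let n := r.1
  let s := r.2.1
  let nz := r.2.2
  let win := PySem.Int.floordiv (nz + s) 2
  let loss := PySem.Int.floordiv (nz - s) 2
  (win, loss, n - nz)

-- ===== PRECONDITION & SPEC =====
def Spec_win_loss_tie (match_results : List (Int × String × Int × Int)) (out : Int × Int × Int) : Prop := out = win_loss_tie_alt match_results
instance (match_results : List (Int × String × Int × Int)) (out : Int × Int × Int) : Decidable (Spec_win_loss_tie match_results out) := by unfold Spec_win_loss_tie; infer_instance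

-- ===== CLAIM (what is proved, stated in full; the proofs are below) =====
def Claim_equal_win_loss_tie : Prop := ∀ (match_results : List (Int × String × Int × Int)), Dom_win_loss_tie match_results → Spec_win_loss_tie match_results (win_loss_tie match_results)

-- ===== LEMMAS AND PROOFS =====

-- A's loop starting from (w,l,t) is a shift of the loop from (0,0,0)
lemma wlt_fold_shift (xs : List (Int × String × Int × Int)) (w l t : Int) :
    win_loss_tie_aux xs (w, l, t)
      = ((win_loss_tie_aux xs (0, 0, 0)).1 + w,
         (win_loss_tie_aux xs (0, 0, 0)).2.1 + l,
         (win_loss_tie_aux xs (0, 0, 0)).2.2 + t) := by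
  induction xs generalizing w l t with
  | nil => simp [win_loss_tie_aux]
  | cons x xs ih =>
    obtain ⟨_id, _team, o, s⟩ := x
    simp only [win_loss_tie_aux]
    split_ifs
    · rw [ih (w + 1) l t, ih (0 + 1) 0 0]; simp [Prod.ext_iff]; omega
    · rw [ih w (l + 1) t, ih 0 (0 + 1) 0]; simp [Prod.ext_iff]; omega
    · rw [ih w l (t + 1), ih 0 0 (0 + 1)]; simp [Prod.ext_iff]; omega

-- B's reduction computes (w+l+t, w-l, w+l) of A's counts
lemma wlt_alt_aux_eq (xs : List (Int × String × Int × Int)) (n s nz : Int) :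
    win_loss_tie_alt_aux xs (n, s, nz)
      = (n + ((win_loss_tie_aux xs (0,0,0)).1 + (win_loss_tie_aux xs (0,0,0)).2.1 + (win_loss_tie_aux xs (0,0,0)).2.2),
         s + ((win_loss_tie_aux xs (0,0,0)).1 - (win_loss_tie_aux xs (0,0,0)).2.1),
         nz + ((win_loss_tie_aux xs (0,0,0)).1 + (win_loss_tie_aux xs (0,0,0)).2.1)) := by
  induction xs generalizing n s nz with
  | nil => simp [win_loss_tie_alt_aux, win_loss_tie_aux]
  | cons x xs ih =>
    obtain ⟨_id, _team, o, t⟩ := x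
    simp only [win_loss_tie_alt_aux, win_loss_tie_aux]
    rw [ih]
    split_ifs with h1 h2
    · exfalso; omega
    · rw [wlt_fold_shift xs (0+1) 0 0]
      simp only [Prod.ext_iff]; refine ⟨by omega, by omega, by omega⟩
    · rw [wlt_fold_shift xs 0 (0+1) 0]
      simp only [Prod.ext_iff]; refine ⟨by omega, by omega, by omega⟩
    · rw [wlt_fold_shift xs 0 0 (0+1)]
      simp only [Prod.ext_iff]; refine ⟨by omega, by omega, by omega⟩

lemma wlt_eq (xs : List (Int × String × Int × Int)) :
    win_loss_tie xs = win_loss_tie_alt xs := by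
  unfold win_loss_tie win_loss_tie_alt
  rw [wlt_alt_aux_eq]
  obtain ⟨w, l, t⟩ := win_loss_tie_aux xs (0,0,0)
  simp only
  have h2 : (0:Int) < 2 := by omega
  simp only [PySem.Int.floordiv_eq_ediv_of_pos h2]
  simp only [Prod.ext_iff]
  refine ⟨?_, ?_, by omega⟩
  · have e : (0:Int) + (w + l) + (0 + (w - l)) = 2 * w := by ring
    rw [e, Int.mul_ediv_cancel_left _ (by omega)]
  · have e : (0:Int) + (w + l) - (0 + (w - l)) = 2 * l := by ring
    rw [e, Int.mul_ediv_cancel_left _ (by omega)]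

-- ===== VERDICT (by name: the statement is the Claim_ definition above) =====
theorem win_loss_tie_spec : Claim_equal_win_loss_tie := by
  intro xs _
  show win_loss_tie xs = win_loss_tie_alt xs
  exact wlt_eq xs
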